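-- pv_equiv track=rewrite | github.com/Jesus-137/c-_semantico | Analizador.py | classify_tokens
-- ===== SOURCE A (Python) =====
-- def classify_tokens(tokens):
--     classification = {
--         'PR': 0,
--         'ID': 0,
--         'Numeros': 0,
--         'Simbolos': 0,
--         'Error': 0
--     }
--
--     for token_type, _ in tokens:
--         if token_type == 'KEYWORD':
--             classification['PR'] += 1
--         elif token_type == 'IDENTIFIER':
--             classification['ID'] += 1
--         elif token_type == 'NUMBER':
--             classification['Numeros'] += 1
--         elif token_type == 'SYMBOL':
--             classification['Simbolos'] += 1
--         else:
--             classification['Error'] += 1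
--
--     return classification
-- ===== SOURCE B (Python) =====
-- def classify_tokens(tokens):
--     types = [token_type for token_type, _ in tokens]
--     pr = types.count('KEYWORD')
--     ident = types.count('IDENTIFIER')
--     num = types.count('NUMBER')
--     sym = types.count('SYMBOL')
--     return {
--         'PR': pr,
--         'ID': ident,
--         'Numeros': num,
--         'Simbolos': sym,
--         'Error': len(types) - pr - ident - num - sym
--     }
-- ===== Notes on version B (the rewrite author's own statement) =====
-- stated objective: simpler
-- what changed: Replaces the per-token if/elif branch ladder updating a mutable dict with a branch-free aggregate formulation: extract the type list once, take counts of the four known types, and derive Error as the total minus the known counts.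
import Mathlib
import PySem

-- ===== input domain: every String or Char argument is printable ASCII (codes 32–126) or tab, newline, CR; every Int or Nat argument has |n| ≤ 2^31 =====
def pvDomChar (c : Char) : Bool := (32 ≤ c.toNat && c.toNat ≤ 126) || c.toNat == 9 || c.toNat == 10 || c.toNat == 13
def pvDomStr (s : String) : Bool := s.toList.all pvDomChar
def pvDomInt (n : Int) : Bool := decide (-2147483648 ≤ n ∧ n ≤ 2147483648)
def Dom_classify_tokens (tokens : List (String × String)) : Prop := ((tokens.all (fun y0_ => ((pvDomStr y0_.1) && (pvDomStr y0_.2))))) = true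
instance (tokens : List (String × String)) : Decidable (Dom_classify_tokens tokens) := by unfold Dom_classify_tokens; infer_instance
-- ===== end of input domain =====

-- B replaces A's per-token if/elif ladder over a mutable dict with a branch-free
-- count-based table (Error derived as total minus known counts); objective: simpler.


-- ===== PORT A =====
-- the loop body: classification[key] += 1 chosen by the if/elif ladder
def pvStepA (d : PySem.Dict String Int) (tok : String × String) : PySem.Dict String Int :=
  if tok.1 = "KEYWORD" then d.insert "PR" (d.getD "PR" 0 + 1)
  else if tok.1 = "IDENTIFIER" then d.insert "ID" (d.getD "ID" 0 + 1)
  else if tok.1 = "NUMBER" then d.insert "Numeros" (d.getD "Numeros" 0 + 1)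
  else if tok.1 = "SYMBOL" then d.insert "Simbolos" (d.getD "Simbolos" 0 + 1)
  else d.insert "Error" (d.getD "Error" 0 + 1)

def classify_tokens (tokens : List (String × String)) : List (String × Int) :=
  (tokens.foldl pvStepA
    (PySem.Dict.ofList [("PR", 0), ("ID", 0), ("Numeros", 0), ("Simbolos", 0), ("Error", 0)])).items

-- ===== PORT B =====
def classify_tokens_alt (tokens : List (String × String)) : List (String × Int) :=
  let types := tokens.map (fun p => p.1)
  let pr : Int := PySem.List.count types "KEYWORD"
  let ident : Int := PySem.List.count types "IDENTIFIER"
  let num : Int := PySem.List.count types "NUMBER"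
  let sym : Int := PySem.List.count types "SYMBOL"
  [("PR", pr), ("ID", ident), ("Numeros", num), ("Simbolos", sym),
   ("Error", (types.length : Int) - pr - ident - num - sym)]

-- ===== PRECONDITION & SPEC =====
def Spec_classify_tokens (tokens : List (String × String)) (out : List (String × Int)) : Prop := out = classify_tokens_alt tokens
instance (tokens : List (String × String)) (out : List (String × Int)) : Decidable (Spec_classify_tokens tokens out) := by unfold Spec_classify_tokens; infer_instance

-- ===== CLAIM (what is proved, stated in full; the proofs are below) =====
def Claim_equal_classify_tokens : Prop := ∀ (tokens : List (String × String)), Dom_classify_tokens tokens → Spec_classify_tokens tokens (classify_tokens tokens)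

-- ===== LEMMAS AND PROOFS =====

-- loop invariant: folding A's step over ts adds each type's count to its slot,
-- and the Error slot gains the number of tokens matching none of the four types
lemma pvLoopA (ts : List (String × String)) (a b c d e : Int) :
    ts.foldl pvStepA (PySem.Dict.ofList [("PR", a), ("ID", b), ("Numeros", c), ("Simbolos", d), ("Error", e)]) =
    PySem.Dict.ofList
      [("PR", a + ((ts.map (fun p => p.1)).count "KEYWORD" : Int)),
       ("ID", b + ((ts.map (fun p => p.1)).count "IDENTIFIER" : Int)),
       ("Numeros", c + ((ts.map (fun p => p.1)).count "NUMBER" : Int)),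
       ("Simbolos", d + ((ts.map (fun p => p.1)).count "SYMBOL" : Int)),
       ("Error", e + ((ts.length : Int)
          - ((ts.map (fun p => p.1)).count "KEYWORD" : Int)
          - ((ts.map (fun p => p.1)).count "IDENTIFIER" : Int)
          - ((ts.map (fun p => p.1)).count "NUMBER" : Int)
          - ((ts.map (fun p => p.1)).count "SYMBOL" : Int)))] := by
  induction ts generalizing a b c d e with
  | nil => simp
  | cons t rest ih =>
    rw [List.foldl_cons]
    by_cases h1 : t.1 = "KEYWORD"
    · rw [show pvStepA (PySem.Dict.ofList [("PR", a), ("ID", b), ("Numeros", c), ("Simbolos", d), ("Error", e)]) t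
            = PySem.Dict.ofList [("PR", a + 1), ("ID", b), ("Numeros", c), ("Simbolos", d), ("Error", e)] from by
            simp only [pvStepA, h1, if_pos]; rfl, ih]
      simp only [List.map_cons, h1, List.length_cons, List.count_cons]
      congr 1; norm_num; omega
    · by_cases h2 : t.1 = "IDENTIFIER"
      · rw [show pvStepA (PySem.Dict.ofList [("PR", a), ("ID", b), ("Numeros", c), ("Simbolos", d), ("Error", e)]) t
              = PySem.Dict.ofList [("PR", a), ("ID", b + 1), ("Numeros", c), ("Simbolos", d), ("Error", e)] from by
              simp only [pvStepA, h2, if_pos]; rfl, ih]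
        simp only [List.map_cons, h2, List.length_cons, List.count_cons]
        congr 1; norm_num; omega
      · by_cases h3 : t.1 = "NUMBER"
        · rw [show pvStepA (PySem.Dict.ofList [("PR", a), ("ID", b), ("Numeros", c), ("Simbolos", d), ("Error", e)]) t
                = PySem.Dict.ofList [("PR", a), ("ID", b), ("Numeros", c + 1), ("Simbolos", d), ("Error", e)] from by
                simp only [pvStepA, h3]; norm_num; rfl, ih]
          simp only [List.map_cons, h3, List.length_cons, List.count_cons]
          congr 1; norm_num; omega
        · by_cases h4 : t.1 = "SYMBOL"
          · rw [show pvStepA (PySem.Dict.ofList [("PR", a), ("ID", b), ("Numeros", c), ("Simbolos", d), ("Error", e)]) t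
                  = PySem.Dict.ofList [("PR", a), ("ID", b), ("Numeros", c), ("Simbolos", d + 1), ("Error", e)] from by
                  simp only [pvStepA, h4]; norm_num; rfl, ih]
            simp only [List.map_cons, h4, List.length_cons, List.count_cons]
            congr 1; norm_num; omega
          · rw [show pvStepA (PySem.Dict.ofList [("PR", a), ("ID", b), ("Numeros", c), ("Simbolos", d), ("Error", e)]) t
                  = PySem.Dict.ofList [("PR", a), ("ID", b), ("Numeros", c), ("Simbolos", d), ("Error", e + 1)] from by
                  simp only [pvStepA]; rw [if_neg h1, if_neg h2, if_neg h3, if_neg h4]; rfl, ih]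
            simp only [List.map_cons, List.length_cons, List.count_cons]
            congr 1
            simp only [beq_iff_eq, h1, h2, h3, h4, if_false]
            norm_num; omega

-- ===== VERDICT (by name: the statement is the Claim_ definition above) =====
theorem classify_tokens_spec : Claim_equal_classify_tokens := by
  intro tokens _
  unfold Spec_classify_tokens classify_tokens classify_tokens_alt
  rw [pvLoopA]
  simp only [PySem.List.count_eq, List.length_map]
  generalize (List.count "KEYWORD" (tokens.map (fun p => p.1)) : Int) = k
  generalize (List.count "IDENTIFIER" (tokens.map (fun p => p.1)) : Int) = i
  generalize (List.count "NUMBER" (tokens.map (fun p => p.1)) : Int) = n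
  generalize (List.count "SYMBOL" (tokens.map (fun p => p.1)) : Int) = s
  generalize (tokens.length : Int) = L
  simp only [zero_add]
  rfl
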